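-- pv_equiv track=rewrite | github.com/jonddeck/Sorting-Algorithms | Overview/all_sorts_visualizer.py | track_merge
-- ===== SOURCE A (Python) =====
-- def track_merge(arr):
--     a = list(arr)
--     steps = [a.copy()]
--     highlights = [[]]
--
--     def merge(lo, mid, hi):
--         tmp = []
--         i, j = lo, mid + 1
--         while i <= mid and j <= hi:
--             if a[i] <= a[j]:
--                 tmp.append(a[i]); i += 1
--             else:
--                 tmp.append(a[j]); j += 1
--         while i <= mid:
--             tmp.append(a[i]); i += 1
--         while j <= hi:
--             tmp.append(a[j]); j += 1
--         for k, v in enumerate(tmp):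
--             a[lo + k] = v
--         steps.append(a.copy())
--         highlights.append(list(range(lo, hi + 1)))
--
--     def sort(lo, hi):
--         if lo >= hi:
--             return
--         mid = (lo + hi) // 2
--         sort(lo, mid)
--         sort(mid + 1, hi)
--         merge(lo, mid, hi)
--
--     sort(0, len(a) - 1)
--     return steps, highlights
-- ===== SOURCE B (Python) =====
-- def track_merge(arr):
--     a = list(arr)
--     steps = [a.copy()]
--     highlights = [[]]
--     stack = [("sort", 0, len(a) - 1)]
--     while stack:
--         frame = stack.pop()
--         if frame[0] == "sort":
--             _, lo, hi = frame
--             if lo < hi: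
--                 mid = (lo + hi) // 2
--                 stack.append(("merge", lo, mid, hi))
--                 stack.append(("sort", mid + 1, hi))
--                 stack.append(("sort", lo, mid))
--         else:
--             _, lo, mid, hi = frame
--             i, j, tmp = lo, mid + 1, []
--             while i <= mid or j <= hi:
--                 if j > hi or (i <= mid and a[i] <= a[j]):
--                     tmp.append(a[i]); i += 1
--                 else:
--                     tmp.append(a[j]); j += 1
--             for k, v in enumerate(tmp):
--                 a[lo + k] = v
--             steps.append(a.copy())
--             highlights.append(list(range(lo, hi + 1)))
--     return steps, highlights
-- ===== Notes on version B (the rewrite author's own statement) =====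
-- stated objective: alternative
-- what changed: The two inner recursive helpers are replaced by a single explicit-stack loop that drives the same post-order traversal with sort/merge marker frames, and the merge's three sequential while-loops are fused into one combined-condition loop.
import Mathlib
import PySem

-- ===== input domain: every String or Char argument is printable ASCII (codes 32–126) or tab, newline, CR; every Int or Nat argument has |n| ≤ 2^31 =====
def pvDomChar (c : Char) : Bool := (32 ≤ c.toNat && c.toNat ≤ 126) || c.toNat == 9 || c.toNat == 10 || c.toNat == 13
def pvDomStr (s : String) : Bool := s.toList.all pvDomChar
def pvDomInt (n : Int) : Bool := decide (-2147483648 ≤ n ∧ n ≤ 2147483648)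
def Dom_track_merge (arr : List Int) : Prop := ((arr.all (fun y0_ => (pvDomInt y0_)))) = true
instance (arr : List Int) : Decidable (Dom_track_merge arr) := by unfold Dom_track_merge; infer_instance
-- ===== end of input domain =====

-- B replaces A's recursive sort helper by an explicit stack of sort/merge frames driving the
-- same post-order traversal, and fuses the merge's three while-loops into one (objective: alternative).
-- Both ports use an explicit Nat fuel as a totality guard only; each fuel expression is an exact
-- bound on the number of loop iterations / recursion depth, so the guard never fires early.

-- Shared helper: the identical write-back for-loop 'for k, v in enumerate(tmp): a[lo+k] = v'
-- that appears verbatim in both Pythons (list assignment; indices always in range in both programs).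
def pvWriteBack (a : List Int) (lo : Int) (tmp : List Int) : List Int :=
  match tmp with
  | [] => a
  | v :: rest => pvWriteBack (PySem.List.pySetD a lo v) (lo + 1) rest

-- ===== PORT A =====
-- the three sequential while-loops of A's merge, building tmp
-- (fuel = remaining iterations, exactly (mid+1-i).toNat + (hi+1-j).toNat at every call)
def pvMergeTmpA (a : List Int) (mid hi : Int) : Nat → Int → Int → List Int
  | 0, _, _ => []
  | fuel + 1, i, j =>
    if i ≤ mid ∧ j ≤ hi then
      if PySem.List.pyGetD a i 0 ≤ PySem.List.pyGetD a j 0 then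
        PySem.List.pyGetD a i 0 :: pvMergeTmpA a mid hi fuel (i + 1) j
      else
        PySem.List.pyGetD a j 0 :: pvMergeTmpA a mid hi fuel i (j + 1)
    else if i ≤ mid then PySem.List.pyGetD a i 0 :: pvMergeTmpA a mid hi fuel (i + 1) j
    else if j ≤ hi then PySem.List.pyGetD a j 0 :: pvMergeTmpA a mid hi fuel i (j + 1)
    else []

def pvMergeA (a : List Int) (lo mid hi : Int) : List Int :=
  pvWriteBack a lo (pvMergeTmpA a mid hi ((mid + 1 - lo).toNat + (hi - mid).toNat) lo (mid + 1))

-- A's recursive sort; state = (a, steps, highlights); fuel = recursion depth bound (hi - lo).toNat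
def pvSortA : Nat → Int → Int → List Int × List (List Int) × List (List Int) →
    List Int × List (List Int) × List (List Int)
  | 0, _, _, s => s
  | fuel + 1, lo, hi, s =>
    if lo ≥ hi then s
    else
      let mid := PySem.Int.floordiv (lo + hi) 2
      let s1 := pvSortA fuel lo mid s
      let s2 := pvSortA fuel (mid + 1) hi s1
      let a' := pvMergeA s2.1 lo mid hi
      (a', s2.2.1 ++ [a'], s2.2.2 ++ [PySem.List.pyRange lo (hi + 1) 1])

def track_merge (arr : List Int) : List (List Int) × List (List Int) :=
  let s := pvSortA (((arr.length : Int) - 1) - 0).toNat 0 ((arr.length : Int) - 1) (arr, [arr], [[]])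
  (s.2.1, s.2.2)

-- ===== PORT B =====
inductive PvFrame : Type
  | sortF : Int → Int → PvFrame
  | mergeF : Int → Int → Int → PvFrame
deriving DecidableEq, Repr

def pvFrameW : PvFrame → Nat
  | .sortF lo hi => 3 ^ ((hi - lo).toNat + 1)
  | .mergeF _ _ _ => 1

def pvStackW (fs : List PvFrame) : Nat := (fs.map pvFrameW).sum

-- B's merge: one combined-condition while loop building tmp (fuel exactly as in A's merge)
def pvMergeTmpB (a : List Int) (mid hi : Int) : Nat → Int → Int → List Int
  | 0, _, _ => []
  | fuel + 1, i, j =>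
    if i ≤ mid ∨ j ≤ hi then
      if hi < j ∨ (i ≤ mid ∧ PySem.List.pyGetD a i 0 ≤ PySem.List.pyGetD a j 0) then
        PySem.List.pyGetD a i 0 :: pvMergeTmpB a mid hi fuel (i + 1) j
      else
        PySem.List.pyGetD a j 0 :: pvMergeTmpB a mid hi fuel i (j + 1)
    else []

def pvMergeB (a : List Int) (lo mid hi : Int) : List Int :=
  pvWriteBack a lo (pvMergeTmpB a mid hi ((mid + 1 - lo).toNat + (hi - mid).toNat) lo (mid + 1))

-- B's driver: explicit stack, left child processed first, merge marker after both children
-- (fuel = iteration bound pvStackW of the current stack)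
def pvLoopB : Nat → List PvFrame → List Int × List (List Int) × List (List Int) →
    List Int × List (List Int) × List (List Int)
  | 0, _, s => s
  | fuel + 1, fs, s =>
    match fs with
    | [] => s
    | .sortF lo hi :: rest =>
      if lo < hi then
        let mid := PySem.Int.floordiv (lo + hi) 2
        pvLoopB fuel (.sortF lo mid :: .sortF (mid + 1) hi :: .mergeF lo mid hi :: rest) s
      else pvLoopB fuel rest s
    | .mergeF lo mid hi :: rest =>
      let a' := pvMergeB s.1 lo mid hi
      pvLoopB fuel rest (a', s.2.1 ++ [a'], s.2.2 ++ [PySem.List.pyRange lo (hi + 1) 1])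

def track_merge_alt (arr : List Int) : List (List Int) × List (List Int) :=
  let stack : List PvFrame := [.sortF 0 ((arr.length : Int) - 1)]
  let s := pvLoopB (pvStackW stack) stack (arr, [arr], [[]])
  (s.2.1, s.2.2)

-- ===== PRECONDITION & SPEC =====
def Spec_track_merge (arr : List Int) (out : List (List Int) × List (List Int)) : Prop := out = track_merge_alt arr
instance (arr : List Int) (out : List (List Int) × List (List Int)) : Decidable (Spec_track_merge arr out) := by unfold Spec_track_merge; infer_instance

-- ===== CLAIM (what is proved, stated in full; the proofs are below) =====
def Claim_equal_track_merge : Prop := ∀ (arr : List Int), Dom_track_merge arr → Spec_track_merge arr (track_merge arr)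

-- ===== LEMMAS AND PROOFS =====

theorem pvMidBounds {lo hi : Int} (h : lo < hi) :
    lo ≤ PySem.Int.floordiv (lo + hi) 2 ∧ PySem.Int.floordiv (lo + hi) 2 < hi :=
  ⟨(PySem.Int.floordiv_two_mid_bounds (le_of_lt h)).1,
   (PySem.Int.floordiv_lt_iff_lt_mul (by omega)).mpr (by omega)⟩

theorem pvThreeLt (x y : Nat) (hx : 3 ≤ x) (hy : 3 ≤ y) : x + y + 1 < x * y := by
  nlinarith

theorem pvFrameW_pos (f : PvFrame) : 1 ≤ pvFrameW f := by
  cases f with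
  | sortF lo hi => simp only [pvFrameW]; exact Nat.one_le_pow _ _ (by omega)
  | mergeF lo mid hi => exact le_rfl

theorem pvStackW_split {lo hi : Int} (hlt : lo < hi) (rest : List PvFrame) :
    pvStackW (.sortF lo (PySem.Int.floordiv (lo + hi) 2) ::
      .sortF (PySem.Int.floordiv (lo + hi) 2 + 1) hi ::
      .mergeF lo (PySem.Int.floordiv (lo + hi) 2) hi :: rest) <
    pvStackW (.sortF lo hi :: rest) := by
  have h := pvMidBounds hlt
  simp only [pvStackW, List.map_cons, List.sum_cons, pvFrameW]
  have key : 3 ^ ((PySem.Int.floordiv (lo + hi) 2 - lo).toNat + 1) +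
      3 ^ ((hi - (PySem.Int.floordiv (lo + hi) 2 + 1)).toNat + 1) + 1 <
      3 ^ ((hi - lo).toNat + 1) := by
    have e : (hi - lo).toNat + 1 =
        ((PySem.Int.floordiv (lo + hi) 2 - lo).toNat + 1) +
        ((hi - (PySem.Int.floordiv (lo + hi) 2 + 1)).toNat + 1) := by omega
    rw [e]; conv_rhs => rw [pow_add]
    exact pvThreeLt _ _ (Nat.le_self_pow (Nat.succ_ne_zero _) 3) (Nat.le_self_pow (Nat.succ_ne_zero _) 3)
  omega

-- equal-fuel runs of the two merge loops coincide
theorem pvMergeTmp_eq (a : List Int) (mid hi : Int) :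
    ∀ (fuel : Nat) (i j : Int), pvMergeTmpB a mid hi fuel i j = pvMergeTmpA a mid hi fuel i j := by
  intro fuel
  induction fuel with
  | zero => intro i j; rfl
  | succ n ih =>
    intro i j
    rw [pvMergeTmpB, pvMergeTmpA]
    by_cases h1 : i ≤ mid <;> by_cases h2 : j ≤ hi
    · by_cases hc : PySem.List.pyGetD a i 0 ≤ PySem.List.pyGetD a j 0
      · rw [if_pos (Or.inl h1), if_pos (Or.inr ⟨h1, hc⟩), if_pos ⟨h1, h2⟩, if_pos hc, ih]
      · rw [if_pos (Or.inl h1),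
            if_neg (show ¬ (hi < j ∨ (i ≤ mid ∧ PySem.List.pyGetD a i 0 ≤ PySem.List.pyGetD a j 0)) from
              fun hh => hh.elim (fun _ => by omega) (fun hh => hc hh.2)),
            if_pos ⟨h1, h2⟩, if_neg hc, ih]
    · rw [if_pos (Or.inl h1), if_pos (Or.inl (by omega)),
          if_neg (show ¬ (i ≤ mid ∧ j ≤ hi) by omega), if_pos h1, ih]
    · rw [if_pos (Or.inr h2),
          if_neg (show ¬ (hi < j ∨ (i ≤ mid ∧ PySem.List.pyGetD a i 0 ≤ PySem.List.pyGetD a j 0)) from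
            fun hh => hh.elim (fun _ => by omega) (fun hh => h1 hh.1)),
          if_neg (show ¬ (i ≤ mid ∧ j ≤ hi) by omega), if_neg h1, if_pos h2, ih]
    · rw [if_neg (show ¬ (i ≤ mid ∨ j ≤ hi) by omega),
          if_neg (show ¬ (i ≤ mid ∧ j ≤ hi) by omega), if_neg h1, if_neg h2]

theorem pvMerge_eq (a : List Int) (lo mid hi : Int) :
    pvMergeB a lo mid hi = pvMergeA a lo mid hi := by
  unfold pvMergeB pvMergeA
  rw [pvMergeTmp_eq]

-- with lo ≥ hi, pvSortA returns its state whatever the fuel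
theorem pvSortA_base (fuel : Nat) (lo hi : Int) (h : lo ≥ hi)
    (s : List Int × List (List Int) × List (List Int)) : pvSortA fuel lo hi s = s := by
  cases fuel with
  | zero => rfl
  | succ n => rw [pvSortA, if_pos h]

-- any two sufficient fuels give the same result
theorem pvSortA_fuel : ∀ (f g : Nat) (lo hi : Int)
    (s : List Int × List (List Int) × List (List Int)),
    (hi - lo).toNat ≤ f → (hi - lo).toNat ≤ g → pvSortA f lo hi s = pvSortA g lo hi s := by
  intro f
  induction f with
  | zero =>
    intro g lo hi s hf hg
    rw [pvSortA_base 0 lo hi (by omega), pvSortA_base g lo hi (by omega)]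
  | succ n ih =>
    intro g lo hi s hf hg
    by_cases hge : lo ≥ hi
    · rw [pvSortA_base _ _ _ hge, pvSortA_base _ _ _ hge]
    · cases g with
      | zero => omega
      | succ m =>
        have hm := pvMidBounds (show lo < hi by omega)
        rw [pvSortA, pvSortA, if_neg hge, if_neg hge]
        simp only
        rw [ih m lo (PySem.Int.floordiv (lo + hi) 2) s (by omega) (by omega),
            ih m (PySem.Int.floordiv (lo + hi) 2 + 1) hi _ (by omega) (by omega)]

theorem pvStackW_nil_of_zero {fs : List PvFrame} (h : pvStackW fs = 0) : fs = [] := by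
  cases fs with
  | nil => rfl
  | cons f rest =>
    exfalso
    have := pvFrameW_pos f
    simp only [pvStackW, List.map_cons, List.sum_cons] at h
    omega

theorem pvLoopB_nil (fuel : Nat) (s : List Int × List (List Int) × List (List Int)) :
    pvLoopB fuel [] s = s := by
  cases fuel <;> rfl

-- any two sufficient fuels give the same loop result
theorem pvLoopB_fuel : ∀ (f g : Nat) (fs : List PvFrame)
    (s : List Int × List (List Int) × List (List Int)),
    pvStackW fs ≤ f → pvStackW fs ≤ g → pvLoopB f fs s = pvLoopB g fs s := by
  intro f
  induction f with
  | zero =>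
    intro g fs s hf hg
    have hnil := pvStackW_nil_of_zero (show pvStackW fs = 0 by omega)
    subst hnil
    rw [pvLoopB_nil, pvLoopB_nil]
  | succ n ih =>
    intro g fs s hf hg
    cases fs with
    | nil => rw [pvLoopB_nil, pvLoopB_nil]
    | cons fr rest =>
      have hw1 : 1 ≤ pvFrameW fr := pvFrameW_pos fr
      have hrest : pvStackW rest + pvFrameW fr = pvStackW (fr :: rest) := by
        simp only [pvStackW, List.map_cons, List.sum_cons]; omega
      cases g with
      | zero =>
        exfalso
        have := pvStackW_nil_of_zero (show pvStackW (fr :: rest) = 0 by omega)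
        simp at this
      | succ m =>
        cases fr with
        | sortF lo hi =>
          rw [pvLoopB, pvLoopB]
          by_cases hlt : lo < hi
          · simp only [if_pos hlt]
            have hsplit := pvStackW_split hlt rest
            exact ih m _ s (by omega) (by omega)
          · simp only [if_neg hlt]
            exact ih m rest s (by omega) (by omega)
        | mergeF lo mid hi =>
          rw [pvLoopB, pvLoopB]
          exact ih m rest _ (by omega) (by omega)

-- the stack loop runs a sort frame exactly like A's recursive sort
theorem pvLoop_sort (n : Nat) : ∀ (lo hi : Int), (hi - lo).toNat ≤ n →
    ∀ (fs : List PvFrame) (f : Nat), pvStackW (.sortF lo hi :: fs) ≤ f →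
    ∀ (s : List Int × List (List Int) × List (List Int)),
    pvLoopB f (.sortF lo hi :: fs) s = pvLoopB (pvStackW fs) fs (pvSortA (hi - lo).toNat lo hi s) := by
  induction n with
  | zero =>
    intro lo hi h fs f hf s
    have hw : 1 ≤ pvFrameW (.sortF lo hi) := pvFrameW_pos _
    have hrest : pvStackW fs + pvFrameW (.sortF lo hi) = pvStackW (.sortF lo hi :: fs) := by
      simp only [pvStackW, List.map_cons, List.sum_cons]; omega
    cases f with
    | zero => omega
    | succ m =>
      rw [pvLoopB, if_neg (show ¬ lo < hi by omega),
          pvSortA_base _ _ _ (by omega)]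
      exact pvLoopB_fuel m (pvStackW fs) fs s (by omega) le_rfl
  | succ n ih =>
    intro lo hi h fs f hf s
    have hw : 1 ≤ pvFrameW (.sortF lo hi) := pvFrameW_pos _
    have hrest : pvStackW fs + pvFrameW (.sortF lo hi) = pvStackW (.sortF lo hi :: fs) := by
      simp only [pvStackW, List.map_cons, List.sum_cons]; omega
    cases f with
    | zero => omega
    | succ m =>
      by_cases hlt : lo < hi
      · have hmid := pvMidBounds hlt
        have hsplit := pvStackW_split hlt fs
        rw [pvLoopB, if_pos hlt]
        rw [ih lo (PySem.Int.floordiv (lo + hi) 2) (by omega) _ m (by omega) s]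
        rw [ih (PySem.Int.floordiv (lo + hi) 2 + 1) hi (by omega) _ (pvStackW _) le_rfl _]
        have hk : ∃ k, (hi - lo).toNat = k + 1 := ⟨(hi - lo).toNat - 1, by omega⟩
        obtain ⟨k, hk⟩ := hk
        rw [hk, pvSortA, if_neg (show ¬ lo ≥ hi by omega)]
        simp only
        rw [pvSortA_fuel k ((PySem.Int.floordiv (lo + hi) 2 - lo).toNat) lo
              (PySem.Int.floordiv (lo + hi) 2) s (by omega) le_rfl,
            pvSortA_fuel k ((hi - (PySem.Int.floordiv (lo + hi) 2 + 1)).toNat)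
              (PySem.Int.floordiv (lo + hi) 2 + 1) hi _ (by omega) le_rfl]
        have hmw : pvStackW (PvFrame.mergeF lo (PySem.Int.floordiv (lo + hi) 2) hi :: fs) =
            pvStackW fs + 1 := by
          simp only [pvStackW, List.map_cons, List.sum_cons, pvFrameW]; omega
        rw [hmw, pvLoopB]
        simp only [pvMerge_eq]
      · rw [pvLoopB, if_neg hlt, pvSortA_base _ _ _ (by omega)]
        exact pvLoopB_fuel m (pvStackW fs) fs s (by omega) le_rfl

-- ===== VERDICT (by name: the statement is the Claim_ definition above) =====
theorem track_merge_spec : Claim_equal_track_merge := by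
  intro arr _
  show track_merge arr = track_merge_alt arr
  simp only [track_merge, track_merge_alt]
  rw [pvLoop_sort (((arr.length : Int) - 1) - 0).toNat 0 ((arr.length : Int) - 1) (by omega)
        [] (pvStackW [.sortF 0 ((arr.length : Int) - 1)]) le_rfl]
  rw [show pvStackW ([] : List PvFrame) = 0 from rfl, pvLoopB_nil]
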